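-- pv_equiv track=rewrite | github.com/setiamanlhc/haskell | Emurgo/group_students.py | group_students
-- ===== SOURCE A (Python) =====
-- def group_students(students):
--     group_a, group_b, group_c = ([], [], [])
--
--     for (name, group) in students:
--         match group:
--             case 'A':
--                 group_a.append(name)
--             case 'B':
--                 group_b.append(name)
--             case 'C':
--                 group_c.append(name)
--
--     return (group_a, group_b, group_c)
-- ===== SOURCE B (Python) =====
-- def group_students(students):
--     group_a = [name for name, group in students if group == 'A']
--     group_b = [name for name, group in students if group == 'B']
--     group_c = [name for name, group in students if group == 'C']
--     return (group_a, group_b, group_c)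
-- ===== Notes on version B (the rewrite author's own statement) =====
-- stated objective: simpler
-- what changed: Replaced the single-pass match/case dispatch with mutable accumulators by three independent filtering comprehensions, one scan per group.
import Mathlib
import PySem

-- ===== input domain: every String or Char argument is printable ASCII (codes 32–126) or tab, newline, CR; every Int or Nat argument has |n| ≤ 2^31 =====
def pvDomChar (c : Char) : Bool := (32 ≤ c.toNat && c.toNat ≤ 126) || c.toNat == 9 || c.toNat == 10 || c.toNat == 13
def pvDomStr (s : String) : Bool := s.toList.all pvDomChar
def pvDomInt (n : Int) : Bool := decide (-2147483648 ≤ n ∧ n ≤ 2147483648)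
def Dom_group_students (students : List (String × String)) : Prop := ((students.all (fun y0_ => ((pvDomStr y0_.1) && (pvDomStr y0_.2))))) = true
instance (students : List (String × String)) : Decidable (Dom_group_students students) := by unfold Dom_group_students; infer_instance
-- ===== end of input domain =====

-- B replaces A's single match/case loop over three accumulators by three independent
-- filtering passes (one comprehension per group); objective: simpler. Return-value equivalence.

-- ===== PORT A =====
-- one pass, three accumulators, dispatch on the label
def group_students (students : List (String × String)) : List String × List String × List String :=
  let acc := students.foldl
    (fun (s : List String × List String × List String) (p : String × String) =>
      match p.2 with
      | "A" => (s.1 ++ [p.1], s.2.1, s.2.2)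
      | "B" => (s.1, s.2.1 ++ [p.1], s.2.2)
      | "C" => (s.1, s.2.1, s.2.2 ++ [p.1])
      | _ => s)
    ([], [], [])
  (acc.1, acc.2.1, acc.2.2)

-- ===== PORT B =====
-- three filtering comprehensions
def group_students_alt (students : List (String × String)) : List String × List String × List String :=
  ((students.filter (fun p => p.2 == "A")).map (fun p => p.1),
   (students.filter (fun p => p.2 == "B")).map (fun p => p.1),
   (students.filter (fun p => p.2 == "C")).map (fun p => p.1))

-- ===== PRECONDITION & SPEC =====
def Spec_group_students (students : List (String × String)) (out : List String × List String × List String) : Prop := out = group_students_alt students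
instance (students : List (String × String)) (out : List String × List String × List String) : Decidable (Spec_group_students students out) := by unfold Spec_group_students; infer_instance

-- ===== CLAIM (what is proved, stated in full; the proofs are below) =====
def Claim_equal_group_students : Prop := ∀ (students : List (String × String)), Dom_group_students students → Spec_group_students students (group_students students)

-- ===== LEMMAS AND PROOFS =====
theorem group_students_fold_inv (l : List (String × String)) (a b c : List String) :
    l.foldl
      (fun (s : List String × List String × List String) (p : String × String) =>
        match p.2 with
        | "A" => (s.1 ++ [p.1], s.2.1, s.2.2)
        | "B" => (s.1, s.2.1 ++ [p.1], s.2.2)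
        | "C" => (s.1, s.2.1, s.2.2 ++ [p.1])
        | _ => s)
      (a, b, c)
    = (a ++ (l.filter (fun p => p.2 == "A")).map (fun p => p.1),
       b ++ (l.filter (fun p => p.2 == "B")).map (fun p => p.1),
       c ++ (l.filter (fun p => p.2 == "C")).map (fun p => p.1)) := by
  induction l generalizing a b c with
  | nil => simp
  | cons hd tl ih =>
    obtain ⟨n, g⟩ := hd
    by_cases hA : g = "A"
    · subst hA; simp [List.foldl, ih]
    · by_cases hB : g = "B"
      · subst hB; simp [List.foldl, ih, List.filter]
      · by_cases hC : g = "C"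
        · subst hC; simp [List.foldl, ih, List.filter]
        · have hstep : (match g with
            | "A" => ((a ++ [n], b, c) : List String × List String × List String)
            | "B" => (a, b ++ [n], c)
            | "C" => (a, b, c ++ [n])
            | _ => (a, b, c)) = (a, b, c) := by
            split <;> first | rfl | (exfalso; simp_all)
          have eA : (g == "A") = false := by simp [hA]
          have eB : (g == "B") = false := by simp [hB]
          have eC : (g == "C") = false := by simp [hC]
          simp only [List.foldl, List.filter, hstep, ih, eA, eB, eC]

-- ===== VERDICT (by name: the statement is the Claim_ definition above) =====
theorem group_students_spec : Claim_equal_group_students := by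
  intro students _
  unfold Spec_group_students group_students group_students_alt
  rw [group_students_fold_inv]
  simp
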